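-- pv_equiv track=rewrite | github.com/josuedjohnson/Image-RLE- | rle_program.py | count_runs
-- ===== SOURCE A (Python) =====
-- def count_runs(flat_data):
--     #creates variable to count the amount of consecutive numbers
--     consecutive = 0
--     #creates variable to count the amount of runs
--     runs = 1
--     #for loop iterates through the whole list (-1 becasue I am addign 1 to i)
--     for i in range(len(flat_data) - 1):
--         #adds one to consecutive if two adjacent numbers are the same
--         if flat_data[i] == flat_data [i + 1]:
--             consecutive += 1
--             #incriments runs if theres 15 or more consecutive and resets cons counter to 0
--             if consecutive >= 15:
--                 runs += 1
--                 consecutive = 0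
--         #adds one to run counter and resets cons counter if adjacent numbers are different
--         if flat_data[i] != flat_data[i + 1]:
--             consecutive = 0
--             runs += 1
--     #returns runs
--     return runs
-- ===== SOURCE B (Python) =====
-- from itertools import groupby
--
-- def count_runs(flat_data):
--     runs = 1
--     first = True
--     for _, group in groupby(flat_data):
--         length = sum(1 for _ in group)
--         if not first:
--             runs += 1
--         first = False
--         runs += (length - 1) // 15
--     return runs
-- ===== Notes on version B (the rewrite author's own statement) =====
-- stated objective: simpler
-- what changed: Replaced the index-based pair scan with explicit consecutive/runs counters by an itertools.groupby pass over maximal equal-value groups, counting one boundary per later group and (length-1)//15 threshold splits per group.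
import Mathlib
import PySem

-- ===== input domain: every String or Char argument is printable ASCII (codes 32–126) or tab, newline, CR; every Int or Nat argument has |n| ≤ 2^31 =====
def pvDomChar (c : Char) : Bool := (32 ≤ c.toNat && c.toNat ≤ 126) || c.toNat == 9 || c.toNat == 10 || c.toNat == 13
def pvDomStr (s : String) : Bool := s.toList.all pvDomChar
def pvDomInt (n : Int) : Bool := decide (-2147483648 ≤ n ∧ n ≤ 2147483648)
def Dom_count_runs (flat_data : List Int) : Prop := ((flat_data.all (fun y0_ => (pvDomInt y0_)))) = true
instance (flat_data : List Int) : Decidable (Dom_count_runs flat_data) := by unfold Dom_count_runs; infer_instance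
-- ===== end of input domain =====

-- B replaces A's index loop with counters by a pass over maximal equal-value groups (itertools.groupby); objective: simpler.

-- ===== PORT A =====
-- loop body of A's for-loop over range(len(flat_data)-1), state = (consecutive, runs)
def pvBodyA (flat_data : List Int) (s : Int × Int) (i : Int) : Int × Int :=
  let consecutive := s.1
  let runs := s.2
  let s1 : Int × Int :=
    if PySem.List.pyGetD flat_data i 0 = PySem.List.pyGetD flat_data (i + 1) 0 then
      let consecutive := consecutive + 1
      if consecutive ≥ 15 then (0, runs + 1) else (consecutive, runs)
    else (consecutive, runs)
  if PySem.List.pyGetD flat_data i 0 ≠ PySem.List.pyGetD flat_data (i + 1) 0 then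
    (0, s1.2 + 1)
  else s1

def count_runs (flat_data : List Int) : Int :=
  ((PySem.List.pyRange 0 ((flat_data.length : Int) - 1) 1).foldl (pvBodyA flat_data)
    ((0 : Int), (1 : Int))).2

-- ===== PORT B =====
-- port of itertools.groupby on a list of ints: the maximal runs of equal adjacent values
def pvGroups : List Int → List (List Int)
  | [] => []
  | x :: xs =>
    (x :: xs.takeWhile (fun y => y == x)) :: pvGroups (xs.dropWhile (fun y => y == x))
  termination_by l => l.length
  decreasing_by
    have := List.length_dropWhile_le (fun y => y == x) xs
    simp only [List.length_cons]
    omega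

-- loop body of B's for-loop over the groups, state = (runs, first)
def pvBodyB (s : Int × Bool) (g : List Int) : Int × Bool :=
  let runs := if s.2 then s.1 else s.1 + 1
  (runs + PySem.Int.floordiv ((g.length : Int) - 1) 15, false)

def count_runs_alt (flat_data : List Int) : Int :=
  ((pvGroups flat_data).foldl pvBodyB ((1 : Int), true)).1

-- ===== PRECONDITION & SPEC =====
def Spec_count_runs (flat_data : List Int) (out : Int) : Prop := out = count_runs_alt flat_data
instance (flat_data : List Int) (out : Int) : Decidable (Spec_count_runs flat_data out) := by unfold Spec_count_runs; infer_instance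

-- ===== CLAIM (what is proved, stated in full; the proofs are below) =====
def Claim_equal_count_runs : Prop := ∀ (flat_data : List Int), Dom_count_runs flat_data → Spec_count_runs flat_data (count_runs flat_data)

-- ===== LEMMAS AND PROOFS =====

-- A's loop rephrased as a structural recursion over the pairs (prev, head of rest)
def pvLoopA : Int → Int → Int → List Int → Int × Int
  | c, r, _, [] => (c, r)
  | c, r, prev, y :: t =>
    if prev = y then (if c + 1 ≥ 15 then pvLoopA 0 (r + 1) y t else pvLoopA (c + 1) r y t)
    else pvLoopA 0 (r + 1) y t

-- value B adds for one group (its boundary plus its threshold splits)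
def pvGrpVal (g : List Int) : Int := PySem.Int.floordiv ((g.length : Int) - 1) 15 + 1

def pvGSum (gs : List (List Int)) : Int := (gs.map pvGrpVal).sum

lemma pvGetD_cons_succ (a d : Int) (l : List Int) (i : Int) (h : 0 ≤ i) :
    PySem.List.pyGetD (a :: l) (i + 1) d = PySem.List.pyGetD l i d := by
  rw [PySem.List.pyGetD_of_nonneg _ _ (by omega : (0:Int) ≤ i + 1),
    PySem.List.pyGetD_of_nonneg _ _ h]
  have hi : (i + 1).toNat = i.toNat + 1 := by omega
  simp [hi]

lemma pvBodyA_shift (x y : Int) (t2 : List Int) (s : Int × Int) (k : Nat) :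
    pvBodyA (x :: y :: t2) s (1 + (k : Int)) = pvBodyA (y :: t2) s ((k : Int)) := by
  have h1 : (1 + (k : Int)) = (k : Int) + 1 := by omega
  unfold pvBodyA
  rw [h1, pvGetD_cons_succ _ _ _ _ (by omega), pvGetD_cons_succ _ _ _ _ (by omega)]

-- A's index fold equals pvLoopA
lemma pvA_eq_loopA (t : List Int) : ∀ (x c r : Int),
    ((PySem.List.pyRange 0 (((x :: t).length : Int) - 1) 1).foldl (pvBodyA (x :: t)) (c, r))
      = pvLoopA c r x t := by
  induction t with
  | nil =>
    intro x c r
    have h : (((x :: ([] : List Int)).length : Int) - 1) ≤ 0 := by simp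
    rw [PySem.List.pyRange_one_eq_nil h]
    simp [pvLoopA]
  | cons y t2 ih =>
    intro x c r
    have hlen : (((x :: y :: t2).length : Int) - 1) = (t2.length : Int) + 1 := by
      push_cast [List.length_cons]
      ring
    rw [hlen, PySem.List.pyRange_one_cons (by positivity), List.foldl_cons]
    simp only [zero_add]
    have h0 : pvBodyA (x :: y :: t2) (c, r) 0
        = if x = y then (if c + 1 ≥ 15 then ((0 : Int), r + 1) else (c + 1, r))
          else (0, r + 1) := by
      have g0 : PySem.List.pyGetD (x :: y :: t2) 0 0 = x := by simp [PySem.List.pyGetD]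
      have g1 : PySem.List.pyGetD (x :: y :: t2) (0 + 1 : Int) 0 = y := by
        norm_num
        simp [PySem.List.pyGetD]
      unfold pvBodyA
      rw [g0, g1]
      by_cases h : x = y <;> simp [h]
    have hrest : ∀ (s : Int × Int),
        (PySem.List.pyRange 1 ((t2.length : Int) + 1) 1).foldl (pvBodyA (x :: y :: t2)) s
          = pvLoopA s.1 s.2 y t2 := by
      intro s
      rw [PySem.List.pyRange_one 1]
      have hn : ((t2.length : Int) + 1 - 1).toNat = t2.length := by omega
      rw [hn, List.foldl_map]
      have h2 := ih y s.1 s.2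
      rw [PySem.List.pyRange_one 0] at h2
      have hn2 : (((y :: t2).length : Int) - 1 - 0).toNat = t2.length := by simp
      rw [hn2, List.foldl_map] at h2
      rw [← h2]
      have hfun : (fun (s : Int × Int) (k : Nat) => pvBodyA (x :: y :: t2) s (1 + (k : Int)))
          = (fun (s : Int × Int) (k : Nat) => pvBodyA (y :: t2) s (0 + (k : Int))) := by
        funext s k
        simpa using pvBodyA_shift x y t2 s k
      rw [hfun]
    rw [hrest, h0]
    by_cases h : x = y
    · by_cases h15 : c + 1 ≥ 15 <;> simp [pvLoopA, h, h15]
    · simp [pvLoopA, h]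

-- B's fold with the first-flag down equals adding pvGSum
lemma pvFoldB (gs : List (List Int)) : ∀ (r : Int),
    ((gs.foldl pvBodyB (r, false)).1) = r + pvGSum gs := by
  induction gs with
  | nil => intro r; simp [pvGSum]
  | cons g gs ih =>
    intro r
    simp only [List.foldl_cons, pvBodyB]
    simp only [Bool.false_eq_true, if_false]
    rw [ih]
    simp [pvGSum, pvGrpVal]
    ring

-- main invariant: pvLoopA's runs counter in terms of the run/group structure of prev :: rest
lemma pvMain (t : List Int) : ∀ (x c r : Int), 0 ≤ c → c < 15 →
    (pvLoopA c r x t).2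
      = r + (c + ((t.takeWhile (fun y => y == x)).length : Int)) / 15
          + pvGSum (pvGroups (t.dropWhile (fun y => y == x))) := by
  induction t with
  | nil =>
    intro x c r h0 h15
    simp [pvLoopA, pvGroups, pvGSum]
    omega
  | cons y t2 ih =>
    intro x c r h0 h15
    by_cases h : x = y
    · subst h
      simp only [pvLoopA, List.takeWhile_cons, List.dropWhile_cons, beq_self_eq_true,
        if_pos, List.length_cons]
      by_cases h14 : c + 1 ≥ 15
      · rw [if_pos h14, ih x 0 (r + 1) (by omega) (by omega)]
        have hk : (0:Int) ≤ ((t2.takeWhile (fun y => y == x)).length : Int) := by positivity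
        have hc : c = 14 := by omega
        subst hc
        push_cast
        omega
      · rw [if_neg h14, ih x (c + 1) r (by omega) (by omega)]
        push_cast
        omega
    · have hb : (y == x) = false := by
        simp only [beq_eq_false_iff_ne]
        exact fun e => h e.symm
      rw [List.takeWhile_cons, List.dropWhile_cons, hb]
      simp only [Bool.false_eq_true, if_false]
      have hA : pvLoopA c r x (y :: t2) = pvLoopA 0 (r + 1) y t2 := by
        simp [pvLoopA, h]
      rw [hA, ih y 0 (r + 1) (by omega) (by omega), pvGroups]
      simp only [pvGSum, List.map_cons, List.sum_cons]
      have hg : pvGrpVal (y :: t2.takeWhile (fun z => z == y))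
          = ((t2.takeWhile (fun z => z == y)).length : Int) / 15 + 1 := by
        unfold pvGrpVal
        have hlen : (((y :: t2.takeWhile (fun z => z == y)).length : Int) - 1)
            = ((t2.takeWhile (fun z => z == y)).length : Int) := by
          simp
        rw [hlen, PySem.Int.floordiv_eq_ediv_of_pos (by norm_num)]
      rw [hg]
      have hk : (0:Int) ≤ ((t2.takeWhile (fun z => z == y)).length : Int) := by positivity
      simp only [List.length_nil, Nat.cast_zero, add_zero, zero_add]
      omega

-- count_runs_alt on a cons, in run/group terms
lemma pvAlt_cons (x : Int) (t : List Int) :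
    count_runs_alt (x :: t)
      = 1 + (((t.takeWhile (fun y => y == x)).length : Int)) / 15
          + pvGSum (pvGroups (t.dropWhile (fun y => y == x))) := by
  unfold count_runs_alt
  rw [pvGroups]
  simp only [List.foldl_cons, pvBodyB, if_pos]
  rw [pvFoldB]
  have hlen : (((x :: t.takeWhile (fun y => y == x)).length : Int) - 1)
      = ((t.takeWhile (fun y => y == x)).length : Int) := by simp
  rw [hlen, PySem.Int.floordiv_eq_ediv_of_pos (by norm_num)]

-- ===== VERDICT (by name: the statement is the Claim_ definition above) =====
theorem count_runs_spec : Claim_equal_count_runs := by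
  intro fd _
  unfold Spec_count_runs
  cases fd with
  | nil =>
    unfold count_runs count_runs_alt
    rw [PySem.List.pyRange_one_eq_nil (by norm_num)]
    simp [pvGroups]
  | cons x t =>
    unfold count_runs
    rw [pvA_eq_loopA, pvMain t x 0 1 (by omega) (by omega), pvAlt_cons]
    have hk : (0:Int) ≤ ((t.takeWhile (fun y => y == x)).length : Int) := by positivity
    omega
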